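-- pv_equiv track=rewrite | github.com/Gjiha/Universita | Primo anno/Programmazione/programi vscode/esame/appello_sbagliato/FrancescoCosciotti.py | initial_to_substring
-- ===== SOURCE A (Python) =====
-- def initial_to_substring(a):
--
--     d = {}
--     i = 0
--
--
--     for c in a:
--         d[c] = d.get(c,'')
--         if len(d[c]) < len(a[i:]) :
--             d[c] = a[i:]
--         i += 1
--
--     return d
-- ===== SOURCE B (Python) =====
-- def initial_to_substring(a):
--     # Each character maps to the suffix of a starting at its first occurrence.
--     return {c: a[a.find(c):] for c in a}
-- ===== Notes on version B (the rewrite author's own statement) =====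
-- stated objective: idiomatic
-- what changed: A's stateful loop (dict.get with default, length comparison of the current entry against the running suffix, manual index counter) is replaced by a single dict comprehension {c: a[a.find(c):] for c in a} mapping each character directly to the suffix at its first occurrence; the branch and the mutable counter disappear.
import Mathlib
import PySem

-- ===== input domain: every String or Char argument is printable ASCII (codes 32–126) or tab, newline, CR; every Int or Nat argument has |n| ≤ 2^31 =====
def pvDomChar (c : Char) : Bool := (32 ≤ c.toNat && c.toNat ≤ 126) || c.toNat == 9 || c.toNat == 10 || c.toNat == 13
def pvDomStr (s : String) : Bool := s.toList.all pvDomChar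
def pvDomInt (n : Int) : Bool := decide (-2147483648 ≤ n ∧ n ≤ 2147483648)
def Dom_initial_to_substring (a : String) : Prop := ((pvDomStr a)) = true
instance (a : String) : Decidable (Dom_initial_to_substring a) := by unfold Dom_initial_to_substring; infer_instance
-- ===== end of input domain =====

-- B replaces A's forward loop with its get/length-compare branch by a dict comprehension
-- mapping each character directly to the suffix at its first occurrence (a.find(c)); same values, same key order.

-- a Python character (iteration over a string yields one-char strings)
def pvKey (c : Char) : String := String.ofList [c]

-- ===== PORT A =====
-- the for-loop of A: state is the dict d and the running counter i; a[i:] with i ≥ 0 is Str.slice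
def pvLoopA (a : String) (d : PySem.Dict String String) (i : Nat) : List Char → PySem.Dict String String
  | [] => d
  | c :: rest =>
      let k := pvKey c
      let d1 := d.insert k (d.getD k "")                                     -- d[c] = d.get(c,'')
      let d2 := if PySem.Str.len (d1.getD k "") < PySem.Str.len (PySem.Str.slice a (some (i : Int)) none)
                then d1.insert k (PySem.Str.slice a (some (i : Int)) none)   -- d[c] = a[i:]
                else d1
      pvLoopA a d2 (i + 1) rest

def initial_to_substring (a : String) : List (String × String) :=
  (pvLoopA a PySem.Dict.empty 0 a.toList).items

-- ===== PORT B =====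
-- the dict comprehension of B: one unconditional insert per character
def pvLoopB (a : String) (d : PySem.Dict String String) : List Char → PySem.Dict String String
  | [] => d
  | c :: rest =>
      pvLoopB a (d.insert (pvKey c) (PySem.Str.slice a (some (PySem.Str.find a (pvKey c))) none)) rest

def initial_to_substring_alt (a : String) : List (String × String) :=
  (pvLoopB a PySem.Dict.empty a.toList).items

-- ===== PRECONDITION & SPEC =====
def Spec_initial_to_substring (a : String) (out : List (String × String)) : Prop := out = initial_to_substring_alt a
instance (a : String) (out : List (String × String)) : Decidable (Spec_initial_to_substring a out) := by unfold Spec_initial_to_substring; infer_instance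

-- ===== CLAIM (what is proved, stated in full; the proofs are below) =====
def Claim_equal_initial_to_substring : Prop := ∀ (a : String), Dom_initial_to_substring a → Spec_initial_to_substring a (initial_to_substring a)

-- ===== LEMMAS AND PROOFS =====

theorem pvKey_inj {c c' : Char} (h : pvKey c = pvKey c') : c = c' := by
  have := congrArg String.toList h
  simpa [pvKey] using this

-- inserting the value a key already has leaves the dict unchanged
theorem pv_insert_self (d : PySem.Dict String String) (k : String) (v : String)
    (hnd : d.keys.Nodup) (h : d.get? k = some v) : d.insert k v = d := by
  apply PySem.Dict.ext
  rw [PySem.Dict.items_insert_of_contains d v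
      (by rw [PySem.Dict.contains_eq_isSome_get?, h]; rfl)]
  have hfix : ∀ p ∈ d.items, (if (p.1 == k) = true then (k, v) else p) = p := by
    rintro ⟨p1, p2⟩ hp
    by_cases hk : (p1 == k) = true
    · have hpk : p1 = k := eq_of_beq hk
      have h2 : d.get? p1 = some p2 := PySem.Dict.get?_of_mem_items d hp hnd
      rw [hpk, h] at h2
      have hv : v = p2 := Option.some.inj h2
      simp [hpk, hv]
    · simp [hk]
  rw [List.map_congr_left hfix]
  simp

-- [c] is a prefix of cs.drop j exactly when cs[j] = c
theorem pv_prefix_drop {c : Char} {cs : List Char} {j : Nat} (hj : j < cs.length) :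
    [c] <+: cs.drop j ↔ cs[j] = c := by
  constructor
  · rintro ⟨t, ht⟩
    have hd : cs.drop j = c :: t := ht.symm
    have h0 := List.getElem_drop (xs := cs) (i := j) (j := 0)
      (h := by rw [hd]; simp)
    simp only [hd] at h0
    simpa using h0.symm
  · intro h
    exact ⟨cs.drop (j + 1), by rw [← List.getElem_cons_drop hj, h]; rfl⟩

-- Python's a.find(c) is the first-occurrence index, i.e. List.findIdx
theorem pv_find_eq_findIdx {c : Char} {cs : List Char} (hc : c ∈ cs) :
    PySem.Chars.find cs [c] = (List.findIdx (· == c) cs : Int) := by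
  have hne : PySem.Chars.find cs [c] ≠ -1 := by
    rw [Ne, PySem.Chars.find_eq_neg_one_iff, not_not]
    exact (List.singleton_infix_iff c cs).mpr hc
  have hspec := PySem.Chars.findFrom_natCast_spec cs [c] 0 (Nat.zero_le _)
    (by rw [Nat.cast_zero, PySem.Chars.findFrom_zero]; exact hne)
  rw [Nat.cast_zero, PySem.Chars.findFrom_zero] at hspec
  obtain ⟨hnn, hpre, hmin⟩ := hspec
  set r := PySem.Chars.find cs [c] with hr
  have hrlen : r.toNat < cs.length := by
    rcases hpre with ⟨t, ht⟩
    have := congrArg List.length ht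
    simp at this
    omega
  have hidx : List.findIdx (· == c) cs = r.toNat := by
    rw [List.findIdx_eq hrlen]
    refine ⟨by simpa using (pv_prefix_drop hrlen).mp hpre, ?_⟩
    intro j hji
    by_contra hcj
    exact hmin j (Nat.zero_le _) hji ((pv_prefix_drop (Nat.lt_trans hji hrlen)).mpr (by simpa using hcj))
  rw [hidx]; omega

-- what B's insert writes: the suffix at the first occurrence
theorem pv_valueB {c : Char} {a : String} (hc : c ∈ a.toList) :
    PySem.Str.slice a (some (PySem.Str.find a (pvKey c))) none
      = String.ofList (a.toList.drop (List.findIdx (· == c) a.toList)) := by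
  rw [PySem.Str.find_eq, show (pvKey c).toList = [c] by simp [pvKey],
      pv_find_eq_findIdx hc]
  simp [PySem.Str.slice, PySem.List.slice_from_natCast]

-- A's slice a[i:] as a drop
theorem pv_sliceA (a : String) (i : Nat) :
    PySem.Str.slice a (some (i : Int)) none = String.ofList (a.toList.drop i) := by
  simp [PySem.Str.slice, PySem.List.slice_from_natCast]

-- main invariant induction: after i characters both loops hold the same dict,
-- which maps each seen character to the suffix at its first occurrence
theorem pv_loop_eq (a : String) : ∀ (rest : List Char) (i : Nat) (d : PySem.Dict String String),
    a.toList.drop i = rest →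
    d.keys.Nodup →
    (∀ x : Char, d.get? (pvKey x) =
        if x ∈ a.toList.take i
        then some (String.ofList (a.toList.drop (List.findIdx (· == x) a.toList)))
        else none) →
    pvLoopA a d i rest = pvLoopB a d rest := by
  intro rest
  induction rest with
  | nil => intro i d _ _ _; rfl
  | cons c rest' ih =>
    intro i d hdrop hnd hinv
    have hi : i < a.toList.length := by
      by_contra h
      rw [List.drop_eq_nil_of_le (by omega)] at hdrop
      simp at hdrop
    have hci : a.toList[i] = c := by
      have h0 := List.getElem_drop (xs := a.toList) (i := i) (j := 0)
        (h := by rw [hdrop]; simp)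
      simp only [hdrop] at h0
      simpa using h0.symm
    have hcmem : c ∈ a.toList := hci ▸ List.getElem_mem hi
    have hdrop' : a.toList.drop (i + 1) = rest' := by
      have h1 := congrArg List.tail hdrop
      simpa [List.tail_drop] using h1
    have htake : a.toList.take (i + 1) = a.toList.take i ++ [c] := by
      simp [List.take_add_one, List.getElem?_eq_getElem hi, hci]
    have hlenl : a.toList.length = a.length := by simp
    rw [pvLoopA, pvLoopB]
    by_cases hmem : c ∈ a.toList.take i
    · -- c seen before: A's branch is not taken, B overwrites with the same value: d unchanged
      set F := List.findIdx (· == c) a.toList with hF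
      have hFlt : F < i := by
        obtain ⟨j, hjlt, hjval⟩ := List.getElem_of_mem hmem
        have hjlen : (a.toList.take i).length = min i a.toList.length := List.length_take
        rw [List.getElem_take] at hjval
        have hFlen : F < a.toList.length :=
          List.findIdx_lt_length_of_exists ⟨c, hcmem, by simp⟩
        by_contra hle
        have hchar := (List.findIdx_eq hFlen).mp rfl
        have hjF : j < F := by omega
        have := hchar.2 j hjF
        simp [hjval] at this
      have hget : d.get? (pvKey c) = some (String.ofList (a.toList.drop F)) := by
        rw [hinv c, if_pos hmem]
      have hgetD : d.getD (pvKey c) "" = String.ofList (a.toList.drop F) := by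
        rw [PySem.Dict.getD_eq_get?_getD, hget]; rfl
      have hd1 : d.insert (pvKey c) (d.getD (pvKey c) "") = d := by
        rw [hgetD]; exact pv_insert_self d _ _ hnd hget
      simp only [hd1]
      have hcond : ¬ (PySem.Str.len (d.getD (pvKey c) "")
            < PySem.Str.len (PySem.Str.slice a (some (i : Int)) none)) := by
        rw [hgetD, pv_sliceA, PySem.Str.len_eq, PySem.Str.len_eq]
        simp only [String.toList_ofList, List.length_drop]
        omega
      rw [if_neg hcond]
      rw [pv_valueB hcmem, ← hF, pv_insert_self d _ _ hnd hget]
      refine ih (i + 1) d hdrop' hnd ?_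
      intro x
      rw [hinv x, htake]
      by_cases hx : x ∈ a.toList.take i
      · simp [hx]
      · have hxc : x ≠ c := fun h => hx (h ▸ hmem)
        simp [hx, hxc]
    · -- first occurrence of c: both sides insert the suffix at i
      have hFi : List.findIdx (· == c) a.toList = i := by
        rw [List.findIdx_eq hi]
        refine ⟨by simp [hci], ?_⟩
        intro j hji
        by_contra hcj
        have hjlen : j < (a.toList.take i).length := by
          rw [List.length_take]; omega
        have hjtake : (a.toList.take i)[j]'hjlen = c := by
          rw [List.getElem_take]; simpa using hcj
        exact hmem (hjtake ▸ List.getElem_mem hjlen)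
      have hget : d.get? (pvKey c) = none := by rw [hinv c, if_neg hmem]
      have hgetD : d.getD (pvKey c) "" = "" := by
        rw [PySem.Dict.getD_eq_get?_getD, hget]; rfl
      simp only [hgetD]
      have hcond : PySem.Str.len ((d.insert (pvKey c) "").getD (pvKey c) "")
            < PySem.Str.len (PySem.Str.slice a (some (i : Int)) none) := by
        rw [PySem.Dict.getD_insert_self, pv_sliceA, PySem.Str.len_eq, PySem.Str.len_eq]
        simp only [String.toList_ofList, List.length_drop]
        simp
        omega
      rw [if_pos hcond, PySem.Dict.insert_insert_self]
      rw [pv_valueB hcmem, hFi, ← pv_sliceA]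
      refine ih (i + 1) _ hdrop' (PySem.Dict.nodup_keys_insert d _ _ hnd) ?_
      intro x
      rw [htake]
      by_cases hx : x = c
      · subst hx
        rw [PySem.Dict.get?_insert_self, pv_sliceA, hFi]
        simp
      · rw [PySem.Dict.get?_insert_of_ne d _ (fun h => hx (pvKey_inj h)), hinv x]
        have hmm : (x ∈ a.toList.take i ++ [c]) ↔ (x ∈ a.toList.take i) := by simp [hx]
        simp only [hmm]

-- ===== VERDICT (by name: the statement is the Claim_ definition above) =====
theorem initial_to_substring_spec : Claim_equal_initial_to_substring := by
  intro a _
  unfold Spec_initial_to_substring initial_to_substring initial_to_substring_alt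
  rw [pv_loop_eq a a.toList 0 PySem.Dict.empty (by simp) (by simp [PySem.Dict.keys, PySem.Dict.empty])
      (by intro x; simp [PySem.Dict.get?_empty])]
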